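-- pv_equiv track=rewrite | github.com/chenghaugan/a-stock-market-report | scripts/news_storage.py | check_news_coverage
-- ===== SOURCE A (Python) =====
-- from typing import Dict, List, Optional
--
-- def check_news_coverage(news_data: Dict, required_topics: List[str]) -> List[str]:
--     """
--     检查新闻覆盖率，返回未覆盖的主题
--
--     Args:
--         news_data: 新闻数据
--         required_topics: 需要覆盖的主题列表
--
--     Returns:
--         未覆盖的主题列表
--     """
--     covered_topics = []
--     for result in news_data.get("results", []):
--         query = result.get("query", "")
--         for topic in required_topics:
--             if topic.lower() in query.lower():
--                 covered_topics.append(topic)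
--
--     uncovered = [t for t in required_topics if t not in covered_topics]
--     return uncovered
-- ===== SOURCE B (Python) =====
-- def check_news_coverage(news_data, required_topics):
--     """Worklist algorithm: keep only still-uncovered topics while scanning results,
--     stopping early once everything is covered."""
--     remaining = list(required_topics)
--     for result in news_data.get("results", []):
--         if not remaining:
--             break
--         q = result.get("query", "").lower()
--         remaining = [t for t in remaining if t.lower() not in q]
--     return remaining
-- ===== Notes on version B (the rewrite author's own statement) =====
-- stated objective: alternative
-- what changed: Replaced A's two-phase accumulate-covered-list-then-membership-filter with a shrinking worklist: a single pass over the results that removes matched topics from the remaining list and breaks early once it is empty; no covered list and no final filter exist.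
import Mathlib
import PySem

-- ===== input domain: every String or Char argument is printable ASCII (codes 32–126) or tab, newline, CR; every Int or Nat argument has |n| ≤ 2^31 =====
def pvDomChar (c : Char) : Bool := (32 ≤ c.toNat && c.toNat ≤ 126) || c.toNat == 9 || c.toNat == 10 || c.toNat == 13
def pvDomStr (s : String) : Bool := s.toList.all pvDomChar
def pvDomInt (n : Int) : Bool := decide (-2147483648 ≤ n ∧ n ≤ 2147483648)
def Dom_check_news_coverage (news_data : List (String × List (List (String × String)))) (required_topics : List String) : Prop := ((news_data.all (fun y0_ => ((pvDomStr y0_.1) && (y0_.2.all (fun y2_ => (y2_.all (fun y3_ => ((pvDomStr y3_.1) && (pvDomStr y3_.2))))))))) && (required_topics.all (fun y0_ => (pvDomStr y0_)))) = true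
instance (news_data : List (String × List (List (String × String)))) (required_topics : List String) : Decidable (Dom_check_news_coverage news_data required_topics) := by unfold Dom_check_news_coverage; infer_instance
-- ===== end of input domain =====

-- B replaces A's accumulate-covered-then-filter with a shrinking worklist over the results
-- (early break when empty); alternative decomposition, return value only, no mutation involved.
-- ===== PORT A =====
def check_news_coverage (news_data : List (String × List (List (String × String)))) (required_topics : List String) : List String :=
  let results := (PySem.Dict.mk news_data).getD "results" []
  let covered_topics : List String := results.foldl (fun cov result =>
    let query := (PySem.Dict.mk result).getD "query" ""
    required_topics.foldl (fun cov topic =>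
      if PySem.Str.isIn (PySem.Str.lower topic) (PySem.Str.lower query) then cov ++ [topic] else cov) cov) []
  required_topics.filter (fun t => !(covered_topics.contains t))

-- ===== PORT B =====
-- the 'for result in results: if not remaining: break; remaining = [...]' loop of Source B
def cncAltLoop (results : List (List (String × String))) (remaining : List String) : List String :=
  match results with
  | [] => remaining
  | result :: rs =>
    if remaining.isEmpty then remaining
    else
      let q := PySem.Str.lower ((PySem.Dict.mk result).getD "query" "")
      cncAltLoop rs (remaining.filter (fun t => !(PySem.Str.isIn (PySem.Str.lower t) q)))

def check_news_coverage_alt (news_data : List (String × List (List (String × String)))) (required_topics : List String) : List String :=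
  cncAltLoop ((PySem.Dict.mk news_data).getD "results" []) required_topics

-- ===== PRECONDITION & SPEC =====
def Spec_check_news_coverage (news_data : List (String × List (List (String × String)))) (required_topics : List String) (out : List String) : Prop := out = check_news_coverage_alt news_data required_topics
instance (news_data : List (String × List (List (String × String)))) (required_topics : List String) (out : List String) : Decidable (Spec_check_news_coverage news_data required_topics out) := by unfold Spec_check_news_coverage; infer_instance

-- ===== CLAIM (what is proved, stated in full; the proofs are below) =====
def Claim_equal_check_news_coverage : Prop := ∀ (news_data : List (String × List (List (String × String)))) (required_topics : List String), Dom_check_news_coverage news_data required_topics → Spec_check_news_coverage news_data required_topics (check_news_coverage news_data required_topics)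

-- ===== LEMMAS AND PROOFS =====
theorem covered_eq (results : List (List (String × String))) (required_topics : List String)
    (acc : List String) :
    results.foldl (fun cov result =>
      let query := (PySem.Dict.mk result).getD "query" ""
      required_topics.foldl (fun cov topic =>
        if PySem.Str.isIn (PySem.Str.lower topic) (PySem.Str.lower query) then cov ++ [topic] else cov) cov) acc =
    acc ++ results.flatMap (fun result =>
      required_topics.filter (fun topic =>
        PySem.Str.isIn (PySem.Str.lower topic) (PySem.Str.lower ((PySem.Dict.mk result).getD "query" "")))) := by
  induction results generalizing acc with
  | nil => simp
  | cons r rs ih =>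
    rw [List.foldl_cons, ih, List.flatMap_cons]
    simp [PySem.List.foldl_append_if_eq_filter]

theorem altLoop_eq (results : List (List (String × String))) (remaining : List String) :
    cncAltLoop results remaining =
    remaining.filter (fun t => !(results.any (fun result =>
      PySem.Str.isIn (PySem.Str.lower t) (PySem.Str.lower ((PySem.Dict.mk result).getD "query" ""))))) := by
  induction results generalizing remaining with
  | nil => simp [cncAltLoop]
  | cons r rs ih =>
    rw [cncAltLoop]
    by_cases h : remaining.isEmpty
    · simp_all [List.isEmpty_iff]
    · simp only [h, ih, List.filter_filter]
      refine List.filter_congr (fun t _ => ?_)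
      simp [Bool.and_comm]
  termination_by results.length

theorem check_news_coverage_spec : Claim_equal_check_news_coverage := by
  intro news_data required_topics _
  unfold Spec_check_news_coverage check_news_coverage check_news_coverage_alt
  rw [altLoop_eq]
  simp only [covered_eq, List.nil_append]
  refine List.filter_congr (fun t ht => ?_)
  rw [Bool.eq_iff_iff]
  simp [List.mem_flatMap, List.mem_filter, ht]
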